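-- pv_equiv track=rewrite | github.com/andrewradin/duma | web1/dtk/drug_clusters.py | suspect_score
-- ===== SOURCE A (Python) =====
-- def suspect_score(drugs,props):
--     # Scores are going to be 10 or above if a cluster contains multiple
--     # std_smiles values. The other factors influence the score, but are
--     # all acceptable duplicate values given that we're folding different
--     # forms together.
--     counts = []
--     for keytype in 'std_smiles inchi cas pubchem_cid'.split():
--         counts.append((keytype,len(
--             set([p[1] for p in props if p[0] == keytype])
--             )))
--     # include molecular formula as a key
--     counts.append(('molform',len(
--             set([p[1].split('/')[1] for p in props if p[0] == 'inchi'])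
--             )))
--     score = sum([
--             10 if x[0] == 'std_smiles' else 1
--             for x in counts
--             if x[1] > 1
--             ])
--     return score
-- ===== SOURCE B (Python) =====
-- def suspect_score(drugs, props):
--     # Single pass over props maintaining five sets of distinct values,
--     # instead of five separate filtering passes building a counts list.
--     smiles = set(); inchi = set(); cas = set(); pcid = set(); molform = set()
--     for k, v in props:
--         if k == 'std_smiles':
--             smiles.add(v)
--         elif k == 'inchi':
--             inchi.add(v)
--             molform.add(v.split('/')[1])
--         elif k == 'cas':
--             cas.add(v)
--         elif k == 'pubchem_cid':
--             pcid.add(v)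
--     score = 10 if len(smiles) > 1 else 0
--     for s in (inchi, cas, pcid, molform):
--         if len(s) > 1:
--             score += 1
--     return score
-- ===== Notes on version B (the rewrite author's own statement) =====
-- stated objective: simpler
-- what changed: One pass over props maintaining five accumulator sets (one per keytype plus molform) replaces A's five separate filter-comprehension passes and the intermediate counts list; the score is then read off the set sizes.
import Mathlib
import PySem

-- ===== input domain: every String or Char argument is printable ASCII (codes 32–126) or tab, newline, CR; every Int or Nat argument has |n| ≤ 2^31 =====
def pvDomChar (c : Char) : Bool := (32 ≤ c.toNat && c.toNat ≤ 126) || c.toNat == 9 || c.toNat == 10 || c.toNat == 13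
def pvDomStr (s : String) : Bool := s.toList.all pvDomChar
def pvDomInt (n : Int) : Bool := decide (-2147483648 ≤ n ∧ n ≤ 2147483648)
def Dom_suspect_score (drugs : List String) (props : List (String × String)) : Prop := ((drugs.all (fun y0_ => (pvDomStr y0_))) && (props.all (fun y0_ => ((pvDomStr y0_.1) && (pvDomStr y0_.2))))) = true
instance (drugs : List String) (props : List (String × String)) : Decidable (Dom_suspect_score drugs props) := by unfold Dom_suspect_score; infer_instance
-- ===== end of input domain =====

-- B replaces A's five filter-comprehension passes and counts list with one pass over props
-- maintaining five accumulator sets; objective: simpler. Equivalence is about the return value.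

-- ===== PORT A =====
def suspect_score (drugs : List String) (props : List (String × String)) : Int :=
  let counts : List (String × Int) :=
    (PySem.Str.split₀ "std_smiles inchi cas pubchem_cid").foldl
      (fun counts keytype =>
        counts ++ [(keytype,
          (PySem.Set.len (PySem.Set.ofList
            ((props.filter (fun p => p.1 == keytype)).map (fun p => p.2))) : Int))]) []
  -- p[1].split('/')[1]: Python raises IndexError when '/' is absent; Pre_ excludes that,
  -- so the .getD 1 "" default is never reached inside Pre_.
  let counts := counts ++ [("molform",
      (PySem.Set.len (PySem.Set.ofList
        ((props.filter (fun p => p.1 == "inchi")).map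
          (fun p => ((PySem.Str.split? p.2 "/").getD []).getD 1 ""))) : Int))]
  ((counts.filter (fun x => decide (1 < x.2))).map
      (fun x => if x.1 == "std_smiles" then (10 : Int) else 1)).sum

-- ===== PORT B =====
-- one step of B's single pass: five accumulator sets (std_smiles, inchi, cas, pubchem_cid, molform)
def ssStep (st : PySem.Set String × PySem.Set String × PySem.Set String × PySem.Set String × PySem.Set String)
    (p : String × String) :
    PySem.Set String × PySem.Set String × PySem.Set String × PySem.Set String × PySem.Set String :=
  if p.1 == "std_smiles" then (PySem.Set.add st.1 p.2, st.2.1, st.2.2.1, st.2.2.2.1, st.2.2.2.2)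
  else if p.1 == "inchi" then
    (st.1, PySem.Set.add st.2.1 p.2, st.2.2.1, st.2.2.2.1,
     PySem.Set.add st.2.2.2.2 (((PySem.Str.split? p.2 "/").getD []).getD 1 ""))
  else if p.1 == "cas" then (st.1, st.2.1, PySem.Set.add st.2.2.1 p.2, st.2.2.2.1, st.2.2.2.2)
  else if p.1 == "pubchem_cid" then (st.1, st.2.1, st.2.2.1, PySem.Set.add st.2.2.2.1 p.2, st.2.2.2.2)
  else st

def suspect_score_alt (drugs : List String) (props : List (String × String)) : Int :=
  let st := props.foldl ssStep
    (PySem.Set.empty, PySem.Set.empty, PySem.Set.empty, PySem.Set.empty,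
     (PySem.Set.empty : PySem.Set String))
  let score : Int := if 1 < (PySem.Set.len st.1 : Int) then 10 else 0
  [st.2.1, st.2.2.1, st.2.2.2.1, st.2.2.2.2].foldl
    (fun sc s => if 1 < (PySem.Set.len s : Int) then sc + 1 else sc) score

-- ===== PRECONDITION & SPEC =====
-- Pre_ excludes inputs where some 'inchi' prop value contains no '/', on which A raises IndexError
-- (B raises the same IndexError there).
def Pre_suspect_score (drugs : List String) (props : List (String × String)) : Prop :=
  (props.all (fun p => !(p.1 == "inchi") || PySem.Str.isIn "/" p.2)) = true
instance (drugs : List String) (props : List (String × String)) : Decidable (Pre_suspect_score drugs props) := by unfold Pre_suspect_score; infer_instance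
def pvWitness_suspect_score : List String × (List (String × String)) :=
  (["d1"], [("inchi", "C2H6O/c1-2-3/h3H"), ("cas", "64-17-5"), ("std_smiles", "CCO")])
def Spec_suspect_score (drugs : List String) (props : List (String × String)) (out : Int) : Prop := out = suspect_score_alt drugs props
instance (drugs : List String) (props : List (String × String)) (out : Int) : Decidable (Spec_suspect_score drugs props out) := by unfold Spec_suspect_score; infer_instance

-- ===== CLAIM (what is proved, stated in full; the proofs are below) =====
def Claim_equal_suspect_score : Prop := ∀ (drugs : List String) (props : List (String × String)), Dom_suspect_score drugs props → Pre_suspect_score drugs props → Spec_suspect_score drugs props (suspect_score drugs props)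

-- ===== LEMMAS AND PROOFS =====

def ssVals (k : String) (props : List (String × String)) : List String :=
  (props.filter (fun p => p.1 == k)).map (fun p => p.2)

def ssMVals (props : List (String × String)) : List String :=
  (props.filter (fun p => p.1 == "inchi")).map (fun p => ((PySem.Str.split? p.2 "/").getD []).getD 1 "")

lemma ssFold_char (props : List (String × String))
    (s1 s2 s3 s4 s5 : PySem.Set String) :
    props.foldl ssStep (s1, s2, s3, s4, s5) =
      (PySem.Set.update s1 (ssVals "std_smiles" props),
       PySem.Set.update s2 (ssVals "inchi" props),
       PySem.Set.update s3 (ssVals "cas" props),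
       PySem.Set.update s4 (ssVals "pubchem_cid" props),
       PySem.Set.update s5 (ssMVals props)) := by
  induction props generalizing s1 s2 s3 s4 s5 with
  | nil => simp [ssVals, ssMVals, PySem.Set.update]
  | cons p ps ih =>
    by_cases h1 : p.1 = "std_smiles"
    · simp [ssStep, ssVals, ssMVals, h1, ih, PySem.Set.update]
    · by_cases h2 : p.1 = "inchi"
      · simp [ssStep, ssVals, ssMVals, h2, ih, PySem.Set.update]
      · by_cases h3 : p.1 = "cas"
        · simp [ssStep, ssVals, ssMVals, h3, ih, PySem.Set.update]
        · by_cases h4 : p.1 = "pubchem_cid"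
          · simp [ssStep, ssVals, ssMVals, h4, ih, PySem.Set.update]
          · simp [ssStep, ssVals, ssMVals, h1, h2, h3, h4, ih]

lemma ssSplit_lit :
    PySem.Str.split₀ "std_smiles inchi cas pubchem_cid" =
      ["std_smiles", "inchi", "cas", "pubchem_cid"] := by decide

lemma ssUpdate_empty (l : List String) :
    PySem.Set.update PySem.Set.empty l = PySem.Set.ofList l := rfl

-- ===== VERDICT (by name: the statement is the Claim_ definition above) =====
theorem suspect_score_spec : Claim_equal_suspect_score := by
  intro drugs props _ _
  unfold Spec_suspect_score suspect_score suspect_score_alt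
  rw [ssSplit_lit, ssFold_char]
  simp only [ssUpdate_empty, List.foldl_cons, List.foldl_nil, ssVals, ssMVals]
  split_ifs <;> simp_all
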